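-- pv_equiv track=rewrite | github.com/ms1ee/grpo | data/token_stats_grpo.py | bin_counts
-- ===== SOURCE A (Python) =====
-- import math
-- from collections import OrderedDict
--
-- def build_bins():
--     edges = [256, 512, 768, 1024, 1536, 2048, 3072, 4096, 6144, 8192]
--     bins = OrderedDict()
--     prev = 0
--     for edge in edges:
--         bins[(prev, edge)] = f"{prev + 1}-{edge}"
--         prev = edge
--     bins[(edges[-1], math.inf)] = f">{edges[-1]}"
--     return bins
--
-- def bin_counts(lengths):
--     bins = build_bins()
--     ordered_counts = OrderedDict((label, 0) for label in bins.values())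
--     for value in lengths:
--         for (low, high), label in bins.items():
--             if low < value <= high:
--                 ordered_counts[label] += 1
--                 break
--     total = sum(ordered_counts.values())
--     return ordered_counts, total
-- ===== SOURCE B (Python) =====
-- from bisect import bisect_left
-- from collections import OrderedDict
--
-- def bin_counts(lengths):
--     edges = [256, 512, 768, 1024, 1536, 2048, 3072, 4096, 6144, 8192]
--     labels = ["1-256", "257-512", "513-768", "769-1024", "1025-1536", "1537-2048",
--               "2049-3072", "3073-4096", "4097-6144", "6145-8192", ">8192"]
--     counts = OrderedDict((label, 0) for label in labels)
--     for value in lengths: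
--         if value >= 1:
--             counts[labels[bisect_left(edges, value)]] += 1
--     total = sum(counts.values())
--     return counts, total
-- ===== Notes on version B (the rewrite author's own statement) =====
-- stated objective: idiomatic
-- what changed: Replaces the nested per-value scan over (low, high) interval bins (with break) by literal label/edge lists and a single bisect_left binary search per value to pick the bin index.
import Mathlib
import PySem

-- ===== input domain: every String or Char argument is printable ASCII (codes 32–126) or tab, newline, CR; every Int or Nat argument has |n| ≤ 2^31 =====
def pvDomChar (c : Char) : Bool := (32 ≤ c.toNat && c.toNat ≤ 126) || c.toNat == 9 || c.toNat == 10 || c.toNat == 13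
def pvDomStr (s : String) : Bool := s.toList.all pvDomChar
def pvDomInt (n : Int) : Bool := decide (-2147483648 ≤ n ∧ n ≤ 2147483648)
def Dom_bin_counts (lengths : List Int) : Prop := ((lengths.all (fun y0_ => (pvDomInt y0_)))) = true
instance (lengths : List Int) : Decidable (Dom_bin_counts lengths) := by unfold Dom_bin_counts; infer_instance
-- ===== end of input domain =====

-- B replaces A's per-value linear scan over (low, high) bin intervals by a single
-- bisect_left lookup into the sorted edge list (idiomatic; same outputs, including
-- values ≤ 0 falling into no bin).

-- ===== PORT A =====
-- build_bins: dict keyed by (low, high); math.inf as the upper bound of the last bin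
-- is modeled by `none` (v ≤ inf is always true for an int, which is exact here).
def buildBins : PySem.Dict (Int × Option Int) String :=
  let edges : List Int := [256, 512, 768, 1024, 1536, 2048, 3072, 4096, 6144, 8192]
  let s := edges.foldl
    (fun (s : PySem.Dict (Int × Option Int) String × Int) edge =>
      -- f"{prev + 1}-{edge}" = str(prev+1) ++ "-" ++ str(edge), exact for ints
      (s.1.insert (s.2, some edge) (String.ofList (PySem.Int.toChars (s.2 + 1) ++ '-' :: PySem.Int.toChars edge)), edge))
    (PySem.Dict.empty, 0)
  s.1.insert (8192, none) (String.ofList ('>' :: PySem.Int.toChars 8192))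

-- the inner `for … in bins.items(): if low < value <= high: …; break` loop
def loopA : List ((Int × Option Int) × String) → Int → PySem.Dict String Int → PySem.Dict String Int
  | [], _, d => d
  | ((low, high), label) :: rest, v, d =>
      -- `low < value <= high` with high = inf ⇒ the second comparison is always true
      if decide (low < v) && (match high with | some h => decide (v ≤ h) | none => true) then
        d.modify label 0 (· + 1)          -- ordered_counts[label] += 1 (label always present)
      else loopA rest v d

def bin_counts (lengths : List Int) : (List (String × Int)) × Int :=
  let bins := buildBins
  let counts0 := bins.values.foldl (fun d l => d.insert l 0) PySem.Dict.empty
  let counts := lengths.foldl (fun d v => loopA bins.items v d) counts0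
  (counts.items, counts.values.sum)

-- ===== PORT B =====
def edgesB : List Int := [256, 512, 768, 1024, 1536, 2048, 3072, 4096, 6144, 8192]
def labelsB : List String := ["1-256", "257-512", "513-768", "769-1024", "1025-1536",
  "1537-2048", "2049-3072", "3073-4096", "4097-6144", "6145-8192", ">8192"]

def bin_counts_alt (lengths : List Int) : (List (String × Int)) × Int :=
  let counts0 := labelsB.foldl (fun d l => d.insert l 0) PySem.Dict.empty
  let counts := lengths.foldl
    (fun d v =>
      if 1 ≤ v then
        match PySem.List.pyGet? labelsB ((PySem.List.bisectLeft edgesB v : Nat) : Int) with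
        | some lab => d.modify lab 0 (· + 1)   -- counts[labels[i]] += 1
        | none => d                            -- unreachable: bisect index ≤ 10
      else d)
    counts0
  (counts.items, counts.values.sum)

-- ===== PRECONDITION & SPEC =====
def Spec_bin_counts (lengths : List Int) (out : (List (String × Int)) × Int) : Prop := out = bin_counts_alt lengths
instance (lengths : List Int) (out : (List (String × Int)) × Int) : Decidable (Spec_bin_counts lengths out) := by unfold Spec_bin_counts; infer_instance

-- ===== CLAIM (what is proved, stated in full; the proofs are below) =====
def Claim_equal_bin_counts : Prop := ∀ (lengths : List Int), Dom_bin_counts lengths → Spec_bin_counts lengths (bin_counts lengths)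

-- ===== LEMMAS AND PROOFS =====

set_option maxHeartbeats 2000000 in
lemma binsItems_eq : buildBins.items =
    [((0, some 256), "1-256"), ((256, some 512), "257-512"), ((512, some 768), "513-768"),
     ((768, some 1024), "769-1024"), ((1024, some 1536), "1025-1536"), ((1536, some 2048), "1537-2048"),
     ((2048, some 3072), "2049-3072"), ((3072, some 4096), "3073-4096"), ((4096, some 6144), "4097-6144"),
     ((6144, some 8192), "6145-8192"), ((8192, none), ">8192")] := by decide

set_option maxHeartbeats 2000000 in
lemma binsValues_eq : buildBins.values = labelsB := by decide

set_option maxHeartbeats 2000000 in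
lemma bisect_eq (v : Int) : PySem.List.bisectLeft edgesB v =
    (if v ≤ 256 then 0 else if v ≤ 512 then 1 else if v ≤ 768 then 2 else if v ≤ 1024 then 3
     else if v ≤ 1536 then 4 else if v ≤ 2048 then 5 else if v ≤ 3072 then 6 else if v ≤ 4096 then 7
     else if v ≤ 6144 then 8 else if v ≤ 8192 then 9 else 10) := by
  obtain ⟨hle, hlt, hge⟩ := PySem.List.bisectLeft_spec edgesB v (by norm_num [edgesB])
  have a0 : 0 < PySem.List.bisectLeft edgesB v → (256:Int) < v := hlt 0 (by norm_num [edgesB])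
  have a1 : 1 < PySem.List.bisectLeft edgesB v → (512:Int) < v := hlt 1 (by norm_num [edgesB])
  have a2 : 2 < PySem.List.bisectLeft edgesB v → (768:Int) < v := hlt 2 (by norm_num [edgesB])
  have a3 : 3 < PySem.List.bisectLeft edgesB v → (1024:Int) < v := hlt 3 (by norm_num [edgesB])
  have a4 : 4 < PySem.List.bisectLeft edgesB v → (1536:Int) < v := hlt 4 (by norm_num [edgesB])
  have a5 : 5 < PySem.List.bisectLeft edgesB v → (2048:Int) < v := hlt 5 (by norm_num [edgesB])
  have a6 : 6 < PySem.List.bisectLeft edgesB v → (3072:Int) < v := hlt 6 (by norm_num [edgesB])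
  have a7 : 7 < PySem.List.bisectLeft edgesB v → (4096:Int) < v := hlt 7 (by norm_num [edgesB])
  have a8 : 8 < PySem.List.bisectLeft edgesB v → (6144:Int) < v := hlt 8 (by norm_num [edgesB])
  have a9 : 9 < PySem.List.bisectLeft edgesB v → (8192:Int) < v := hlt 9 (by norm_num [edgesB])
  have b0 : PySem.List.bisectLeft edgesB v ≤ 0 → v ≤ 256 := hge 0 (by norm_num [edgesB])
  have b1 : PySem.List.bisectLeft edgesB v ≤ 1 → v ≤ 512 := hge 1 (by norm_num [edgesB])
  have b2 : PySem.List.bisectLeft edgesB v ≤ 2 → v ≤ 768 := hge 2 (by norm_num [edgesB])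
  have b3 : PySem.List.bisectLeft edgesB v ≤ 3 → v ≤ 1024 := hge 3 (by norm_num [edgesB])
  have b4 : PySem.List.bisectLeft edgesB v ≤ 4 → v ≤ 1536 := hge 4 (by norm_num [edgesB])
  have b5 : PySem.List.bisectLeft edgesB v ≤ 5 → v ≤ 2048 := hge 5 (by norm_num [edgesB])
  have b6 : PySem.List.bisectLeft edgesB v ≤ 6 → v ≤ 3072 := hge 6 (by norm_num [edgesB])
  have b7 : PySem.List.bisectLeft edgesB v ≤ 7 → v ≤ 4096 := hge 7 (by norm_num [edgesB])
  have b8 : PySem.List.bisectLeft edgesB v ≤ 8 → v ≤ 6144 := hge 8 (by norm_num [edgesB])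
  have b9 : PySem.List.bisectLeft edgesB v ≤ 9 → v ≤ 8192 := hge 9 (by norm_num [edgesB])
  have hlen : PySem.List.bisectLeft edgesB v ≤ 10 := le_trans hle (by norm_num [edgesB])
  split_ifs <;> omega

lemma step_eq (v : Int) (d : PySem.Dict String Int) :
    loopA buildBins.items v d =
      (if 1 ≤ v then
        match PySem.List.pyGet? labelsB ((PySem.List.bisectLeft edgesB v : Nat) : Int) with
        | some lab => d.modify lab 0 (· + 1)
        | none => d
      else d) := by
  rw [binsItems_eq, bisect_eq]
  by_cases h0 : v ≤ 0
  · simp [loopA, show ¬(1 ≤ v) from by omega, show ¬((0:Int) < v) from by omega,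
      show ¬((256:Int) < v) from by omega, show ¬((512:Int) < v) from by omega,
      show ¬((768:Int) < v) from by omega, show ¬((1024:Int) < v) from by omega,
      show ¬((1536:Int) < v) from by omega, show ¬((2048:Int) < v) from by omega,
      show ¬((3072:Int) < v) from by omega, show ¬((4096:Int) < v) from by omega,
      show ¬((6144:Int) < v) from by omega, show ¬((8192:Int) < v) from by omega]
  · by_cases h1 : v ≤ 256
    · simp [loopA, show (0:Int) < v from by omega, h1, show (1:Int) ≤ v from by omega]; rfl
    · by_cases h2 : v ≤ 512
      · simp [loopA, show (256:Int) < v from by omega, h1, h2, show (1:Int) ≤ v from by omega]; rfl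
      · by_cases h3 : v ≤ 768
        · simp [loopA, show (512:Int) < v from by omega, h1, h2, h3, show (1:Int) ≤ v from by omega]; rfl
        · by_cases h4 : v ≤ 1024
          · simp [loopA, show (768:Int) < v from by omega, h1, h2, h3, h4, show (1:Int) ≤ v from by omega]; rfl
          · by_cases h5 : v ≤ 1536
            · simp [loopA, show (1024:Int) < v from by omega, h1, h2, h3, h4, h5, show (1:Int) ≤ v from by omega]; rfl
            · by_cases h6 : v ≤ 2048
              · simp [loopA, show (1536:Int) < v from by omega, h1, h2, h3, h4, h5, h6, show (1:Int) ≤ v from by omega]; rfl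
              · by_cases h7 : v ≤ 3072
                · simp [loopA, show (2048:Int) < v from by omega, h1, h2, h3, h4, h5, h6, h7, show (1:Int) ≤ v from by omega]; rfl
                · by_cases h8 : v ≤ 4096
                  · simp [loopA, show (3072:Int) < v from by omega, h1, h2, h3, h4, h5, h6, h7, h8, show (1:Int) ≤ v from by omega]; rfl
                  · by_cases h9 : v ≤ 6144
                    · simp [loopA, show (4096:Int) < v from by omega, h1, h2, h3, h4, h5, h6, h7, h8, h9, show (1:Int) ≤ v from by omega]; rfl
                    · by_cases h10 : v ≤ 8192
                      · simp [loopA, show (6144:Int) < v from by omega, h1, h2, h3, h4, h5, h6, h7, h8, h9, h10, show (1:Int) ≤ v from by omega]; rfl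
                      · simp [loopA, show (8192:Int) < v from by omega, h1, h2, h3, h4, h5, h6, h7, h8, h9, h10, show (1:Int) ≤ v from by omega]; rfl

-- ===== VERDICT (by name: the statement is the Claim_ definition above) =====
theorem bin_counts_spec : Claim_equal_bin_counts := by
  intro lengths _
  unfold Spec_bin_counts bin_counts bin_counts_alt
  simp only [binsValues_eq, step_eq]
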